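-- pv_equiv track=rewrite | github.com/stbrumme/leetcode | 2409.py | countDaysTogether
-- ===== SOURCE A (Python) =====
-- def countDaysTogether(arriveAlice: str, leaveAlice: str, arriveBob: str, leaveBob: str) -> int:
--     # brute force
--     months = [ 0, 31, 28, 31, 30, 31, 30, 31, 31, 30, 31, 30, 31 ] # prepend zero such that months[1] is January
--
--     result = 0
--     for m in range(1, 12 + 1):
--         for d in range(1, months[m] + 1):
--             today = f"{m:02}-{d:02}"
--
--             if today > leaveAlice or today > leaveBob:
--                 break
--
--             if arriveAlice <= today <= leaveAlice and arriveBob <= today <= leaveBob: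
--                 result += 1
--
--     return result
-- ===== SOURCE B (Python) =====
-- _MONTHS = [31, 28, 31, 30, 31, 30, 31, 31, 30, 31, 30, 31]
-- _DATES = ["%02d-%02d" % (m, d) for m in range(1, 13) for d in range(1, _MONTHS[m - 1] + 1)]
--
--
-- def _rank_le(s):
--     # number of calendar dates <= s, by binary search on the sorted date table
--     lo, hi = 0, len(_DATES)
--     while lo < hi:
--         mid = (lo + hi) // 2
--         if _DATES[mid] <= s:
--             lo = mid + 1
--         else:
--             hi = mid
--     return lo
--
--
-- def _rank_lt(s):
--     # number of calendar dates < s, by binary search on the sorted date table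
--     lo, hi = 0, len(_DATES)
--     while lo < hi:
--         mid = (lo + hi) // 2
--         if _DATES[mid] < s:
--             lo = mid + 1
--         else:
--             hi = mid
--     return lo
--
--
-- def countDaysTogether(arriveAlice, leaveAlice, arriveBob, leaveBob):
--     start = max(arriveAlice, arriveBob)
--     end = min(leaveAlice, leaveBob)
--     return max(0, _rank_le(end) - _rank_lt(start))
-- ===== Notes on version B (the rewrite author's own statement) =====
-- stated objective: alternative
-- what changed: A scans every calendar day with nested month/day loops and a break; B precomputes the sorted 365-entry date table once and returns max(0, rank_le(min(leaves)) - rank_lt(max(arrives))) with two binary searches over the table.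
import Mathlib
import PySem

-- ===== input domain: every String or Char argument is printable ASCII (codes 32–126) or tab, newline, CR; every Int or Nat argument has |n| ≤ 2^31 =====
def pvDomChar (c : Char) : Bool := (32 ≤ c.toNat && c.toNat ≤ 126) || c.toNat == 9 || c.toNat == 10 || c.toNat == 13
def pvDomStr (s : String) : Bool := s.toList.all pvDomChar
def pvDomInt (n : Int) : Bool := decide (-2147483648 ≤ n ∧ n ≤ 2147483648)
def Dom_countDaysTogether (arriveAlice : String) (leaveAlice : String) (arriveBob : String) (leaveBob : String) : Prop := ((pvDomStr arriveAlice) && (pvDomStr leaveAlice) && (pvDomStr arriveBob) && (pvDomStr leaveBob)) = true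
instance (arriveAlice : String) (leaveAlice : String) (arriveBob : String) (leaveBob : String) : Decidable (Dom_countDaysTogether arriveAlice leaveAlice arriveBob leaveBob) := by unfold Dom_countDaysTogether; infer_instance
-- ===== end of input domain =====

-- B replaces A's day-by-day scan of the whole calendar by a precomputed sorted date table and
-- two binary searches (rank of each interval end); same return value for every input.
-- Strings are handled on the List Char side (Python's str comparison is '<' on toList, cf. PYSEM).

-- ===== PORT A =====
-- f"{m:02}-{d:02}" (both Pythons format dates this way: A an f-string, B "%02d-%02d")
def pvFmt (m d : Int) : List Char :=
  PySem.Chars.zfill (PySem.Int.toChars m) 2 ++ '-' :: PySem.Chars.zfill (PySem.Int.toChars d) 2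

def pvMonthsA : List Int := [0, 31, 28, 31, 30, 31, 30, 31, 31, 30, 31, 30, 31]

-- the inner 'for d in range(1, months[m] + 1)' loop with its break
def pvLoopA (aa la ab lb : List Char) (m : Int) : List Int → Int → Int
  | [], result => result
  | d :: ds, result =>
    let today := pvFmt m d
    if la < today ∨ lb < today then result
    else pvLoopA aa la ab lb m ds
      (if aa ≤ today ∧ today ≤ la ∧ ab ≤ today ∧ today ≤ lb then result + 1 else result)

def countDaysTogether (arriveAlice : String) (leaveAlice : String) (arriveBob : String) (leaveBob : String) : Int :=
  (PySem.List.pyRange 1 13 1).foldl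
    (fun result m =>
      pvLoopA arriveAlice.toList leaveAlice.toList arriveBob.toList leaveBob.toList m
        (PySem.List.pyRange 1 (PySem.List.pyGetD pvMonthsA m 0 + 1) 1) result)
    0

-- ===== PORT B =====
def pvMonthsB : List Int := [31, 28, 31, 30, 31, 30, 31, 31, 30, 31, 30, 31]

-- _DATES = ["%02d-%02d" % (m, d) for m in range(1, 13) for d in range(1, _MONTHS[m-1] + 1)]
def pvDates : List (List Char) :=
  (PySem.List.pyRange 1 13 1).flatMap (fun m =>
    (PySem.List.pyRange 1 (PySem.List.pyGetD pvMonthsB (m - 1) 0 + 1) 1).map (fun d => pvFmt m d))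

-- the 'while lo < hi' binary-search loop of _rank_le/_rank_lt (P = the move-right test)
def pvBsearch (P : List Char → Bool) (L : List (List Char)) (lo hi : Nat) : Nat :=
  if lo < hi then
    if P (L.getD ((lo + hi) / 2) []) then pvBsearch P L ((lo + hi) / 2 + 1) hi
    else pvBsearch P L lo ((lo + hi) / 2)
  else lo
termination_by hi - lo
decreasing_by all_goals omega

def countDaysTogether_alt (arriveAlice : String) (leaveAlice : String) (arriveBob : String) (leaveBob : String) : Int :=
  let aa := arriveAlice.toList
  let la := leaveAlice.toList
  let ab := arriveBob.toList
  let lb := leaveBob.toList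
  let start := if aa < ab then ab else aa          -- max(arriveAlice, arriveBob)
  let stop  := if lb < la then lb else la          -- min(leaveAlice, leaveBob)
  let hi : Int := (pvBsearch (fun t => decide (t ≤ stop)) pvDates 0 pvDates.length : Nat)
  let lo : Int := (pvBsearch (fun t => decide (t < start)) pvDates 0 pvDates.length : Nat)
  max 0 (hi - lo)

-- ===== PRECONDITION & SPEC =====
def Spec_countDaysTogether (arriveAlice : String) (leaveAlice : String) (arriveBob : String) (leaveBob : String) (out : Int) : Prop := out = countDaysTogether_alt arriveAlice leaveAlice arriveBob leaveBob
instance (arriveAlice : String) (leaveAlice : String) (arriveBob : String) (leaveBob : String) (out : Int) : Decidable (Spec_countDaysTogether arriveAlice leaveAlice arriveBob leaveBob out) := by unfold Spec_countDaysTogether; infer_instance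

-- ===== CLAIM (what is proved, stated in full; the proofs are below) =====
def Claim_equal_countDaysTogether : Prop := ∀ (arriveAlice : String) (leaveAlice : String) (arriveBob : String) (leaveBob : String), Dom_countDaysTogether arriveAlice leaveAlice arriveBob leaveBob → Spec_countDaysTogether arriveAlice leaveAlice arriveBob leaveBob (countDaysTogether arriveAlice leaveAlice arriveBob leaveBob)

-- ===== LEMMAS AND PROOFS =====

-- the counting predicate of A's inner loop
def pvCond (aa la ab lb t : List Char) : Bool := decide (aa ≤ t ∧ t ≤ la ∧ ab ≤ t ∧ t ≤ lb)

def pvDayStrs (m : Int) : List (List Char) :=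
  (PySem.List.pyRange 1 (PySem.List.pyGetD pvMonthsA m 0 + 1) 1).map (fun d => pvFmt m d)

-- A's inner loop counts the in-interval days of the month (the break drops only failing days)
lemma pvLoopA_eq (aa la ab lb : List Char) (m : Int) (ds : List Int) (r : Int)
    (hs : (ds.map (pvFmt m)).Pairwise (· < ·)) :
    pvLoopA aa la ab lb m ds r
      = r + ((ds.map (pvFmt m)).countP (fun t => pvCond aa la ab lb t) : Int) := by
  induction ds generalizing r with
  | nil => simp [pvLoopA]
  | cons d ds ih =>
    simp only [List.map_cons, List.pairwise_cons] at hs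
    by_cases hbr : la < pvFmt m d ∨ lb < pvFmt m d
    · rw [pvLoopA, if_pos hbr]
      have hzero : (pvFmt m d :: ds.map (pvFmt m)).countP (fun t => pvCond aa la ab lb t) = 0 := by
        rw [List.countP_eq_zero]
        intro t ht
        have hlt : pvFmt m d ≤ t := by
          rcases List.mem_cons.mp ht with rfl | htl
          · exact le_refl _
          · exact le_of_lt (hs.1 t htl)
        simp only [pvCond, decide_eq_true_eq]
        rintro ⟨-, h2, -, h4⟩
        rcases hbr with h | h
        · exact absurd h2 (not_le.mpr (lt_of_lt_of_le h hlt))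
        · exact absurd h4 (not_le.mpr (lt_of_lt_of_le h hlt))
      rw [List.map_cons, hzero]
      simp
    · rw [pvLoopA, if_neg hbr]
      rw [ih _ hs.2, List.map_cons, List.countP_cons]
      by_cases hc : aa ≤ pvFmt m d ∧ pvFmt m d ≤ la ∧ ab ≤ pvFmt m d ∧ pvFmt m d ≤ lb
      · have hb : pvCond aa la ab lb (pvFmt m d) = true := by
          simp [pvCond, hc]
        rw [if_pos hc, hb, if_pos rfl]
        push_cast
        ring
      · have hb : pvCond aa la ab lb (pvFmt m d) = false := by
          simp only [pvCond, decide_eq_false_iff_not]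
          exact hc
        rw [if_neg hc, hb, if_neg Bool.false_ne_true]
        push_cast
        ring

-- A's outer loop sums the months
lemma pvFoldA_eq (aa la ab lb : List Char) (ms : List Int) (r : Int)
    (h : ∀ m ∈ ms, (pvDayStrs m).Pairwise (· < ·)) :
    ms.foldl (fun result m => pvLoopA aa la ab lb m
        (PySem.List.pyRange 1 (PySem.List.pyGetD pvMonthsA m 0 + 1) 1) result) r
      = r + ((ms.flatMap pvDayStrs).countP (fun t => pvCond aa la ab lb t) : Int) := by
  induction ms generalizing r with
  | nil => simp
  | cons m ms ih =>
    rw [List.foldl_cons]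
    have hinner := pvLoopA_eq aa la ab lb m
      (PySem.List.pyRange 1 (PySem.List.pyGetD pvMonthsA m 0 + 1) 1) r
      (h m (List.mem_cons_self))
    rw [hinner, ih _ (fun m' hm' => h m' (List.mem_cons_of_mem _ hm'))]
    rw [List.flatMap_cons, List.countP_append]
    unfold pvDayStrs
    push_cast
    ring

set_option maxRecDepth 8192 in
lemma pvDates_eq : (PySem.List.pyRange 1 13 1).flatMap pvDayStrs = pvDates := by decide

set_option maxRecDepth 8192 in
lemma pvDayStrs_sorted : ∀ m ∈ PySem.List.pyRange 1 13 1, (pvDayStrs m).Pairwise (· < ·) := by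
  decide

set_option maxRecDepth 32768 in
lemma pvDates_chain : pvDates.IsChain (· ≤ ·) := by decide

lemma pvDates_sorted : pvDates.Pairwise (· ≤ ·) :=
  List.isChain_iff_pairwise.mp pvDates_chain

-- binary-search characterisation: if P already holds below lo and fails from hi on, and P is a
-- downward-closed prefix property along L, then pvBsearch finds the exact split point
lemma pvBsearch_spec (P : List Char → Bool) (L : List (List Char))
    (hmono : ∀ i j : Nat, i ≤ j → j < L.length → P (L.getD j []) = true → P (L.getD i []) = true)
    (lo hi : Nat) :
    lo ≤ hi → hi ≤ L.length →
    (∀ i : Nat, i < lo → P (L.getD i []) = true) →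
    (∀ i : Nat, hi ≤ i → i < L.length → P (L.getD i []) = false) →
    pvBsearch P L lo hi ≤ hi ∧
    (∀ i : Nat, i < pvBsearch P L lo hi → P (L.getD i []) = true) ∧
    (∀ i : Nat, pvBsearch P L lo hi ≤ i → i < L.length → P (L.getD i []) = false) := by
  fun_induction pvBsearch P L lo hi with
  | case1 lo hi hlt hP ih =>
    intro hle hhi hlo hup
    have hmid : (lo + hi) / 2 < hi := by omega
    refine ih ?_ hhi ?_ hup
    · omega
    · intro i hi'
      by_cases hcase : i < lo
      · exact hlo i hcase
      · exact hmono i ((lo + hi) / 2) (by omega) (by omega) hP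
  | case2 lo hi hlt hP ih =>
    intro hle hhi hlo hup
    have hmid : (lo + hi) / 2 < hi := by omega
    have h2 := ih (by omega) (by omega) hlo ?_
    · exact ⟨le_trans h2.1 (by omega), h2.2⟩
    · intro i hge hil
      by_cases hcase : hi ≤ i
      · exact hup i hcase hil
      · by_contra hcon
        have : P (L.getD i []) = true := by
          cases hPi : P (L.getD i []) with
          | true => rfl
          | false => exact absurd hPi hcon
        exact hP (hmono ((lo + hi) / 2) i hge hil this)
  | case3 lo hi hlt =>
    intro hle hhi hlo hup
    have : lo = hi := by omega
    refine ⟨le_of_eq this, hlo, ?_⟩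
    intro i hge hil
    exact hup i (this ▸ hge) hil

-- a predicate that holds exactly below k has countP = k
lemma pvCountP_split (P : List Char → Bool) (L : List (List Char)) (k : Nat)
    (hk : k ≤ L.length)
    (h1 : ∀ i : Nat, i < k → P (L.getD i []) = true)
    (h2 : ∀ i : Nat, k ≤ i → i < L.length → P (L.getD i []) = false) :
    L.countP P = k := by
  conv_lhs => rw [← List.take_append_drop k L]
  rw [List.countP_append]
  have t1 : (L.take k).countP P = k := by
    have hall : ∀ a ∈ L.take k, P a = true := by
      intro a ha
      obtain ⟨i, hi, rfl⟩ := List.mem_iff_getElem.mp ha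
      have hik : i < k := by
        have := hi; simp [List.length_take] at this; omega
      have hil : i < L.length := by
        have := hi; simp [List.length_take] at this; omega
      rw [List.getElem_take]
      have := h1 i hik
      rwa [List.getD_eq_getElem L [] hil] at this
    rw [List.countP_eq_length.mpr hall, List.length_take]
    omega
  have t2 : (L.drop k).countP P = 0 := by
    rw [List.countP_eq_zero]
    intro a ha
    obtain ⟨i, hi, rfl⟩ := List.mem_iff_getElem.mp ha
    have hil : k + i < L.length := by
      have := hi; simp [List.length_drop] at this; omega
    rw [List.getElem_drop]
    have := h2 (k + i) (by omega) hil
    rw [List.getD_eq_getElem L [] hil] at this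
    simp [this]
  omega

-- pvBsearch over the whole sorted table computes countP
lemma pvBsearch_countP (P : List Char → Bool)
    (hmono : ∀ i j : Nat, i ≤ j → j < pvDates.length → P (pvDates.getD j []) = true → P (pvDates.getD i []) = true) :
    pvBsearch P pvDates 0 pvDates.length = pvDates.countP P := by
  have h := pvBsearch_spec P pvDates hmono 0 pvDates.length (Nat.zero_le _) (le_refl _)
    (fun i hi => absurd hi (Nat.not_lt_zero i)) (fun i h1 h2 => absurd h2 (not_lt.mpr h1))
  exact (pvCountP_split P pvDates _ h.1 h.2.1 h.2.2).symm

-- interval count = rank(stop) - rank(start), clamped at 0 (any list, any bound strings)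
lemma pvCount_arith (L : List (List Char)) (s e : List Char) :
    ((L.countP (fun t => decide (s ≤ t ∧ t ≤ e)) : Nat) : Int)
      = max 0 ((L.countP (fun t => decide (t ≤ e)) : Int) - (L.countP (fun t => decide (t < s)) : Int)) := by
  by_cases hse : s ≤ e
  · have key : L.countP (fun t => decide (t < s)) + L.countP (fun t => decide (s ≤ t ∧ t ≤ e))
        = L.countP (fun t => decide (t ≤ e)) := by
      induction L with
      | nil => simp
      | cons t L ih =>
        simp only [List.countP_cons, decide_eq_true_eq]
        by_cases h1 : t < s
        · have hte : t ≤ e := le_of_lt (lt_of_lt_of_le h1 hse)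
          have hn : ¬(s ≤ t ∧ t ≤ e) := fun hc => absurd h1 (not_lt.mpr hc.1)
          rw [if_pos h1, if_pos hte, if_neg hn]
          omega
        · by_cases h2 : t ≤ e
          · have hy : s ≤ t ∧ t ≤ e := ⟨not_lt.mp h1, h2⟩
            rw [if_neg h1, if_pos hy, if_pos h2]
            omega
          · have hn : ¬(s ≤ t ∧ t ≤ e) := fun hc => h2 hc.2
            rw [if_neg h1, if_neg hn, if_neg h2]
            omega
    have hmono : L.countP (fun t => decide (t < s)) ≤ L.countP (fun t => decide (t ≤ e)) := by
      omega
    omega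
  · have hes : e < s := not_le.mp hse
    have hz : L.countP (fun t => decide (s ≤ t ∧ t ≤ e)) = 0 := by
      rw [List.countP_eq_zero]
      intro a _
      simp only [decide_eq_true_eq]
      rintro ⟨h1, h2⟩
      exact absurd (le_trans h1 h2) (not_le.mpr hes)
    have hle2 : L.countP (fun t => decide (t ≤ e)) ≤ L.countP (fun t => decide (t < s)) := by
      refine List.countP_mono_left ?_
      intro a _ h
      simp only [decide_eq_true_eq] at h ⊢
      exact lt_of_le_of_lt h hes
    rw [hz]
    push_cast
    omega

-- the per-element equivalence of A's 4-way condition with the interval bounds of B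
lemma pvCond_congr (aa la ab lb t : List Char) :
    pvCond aa la ab lb t
      = decide ((if aa < ab then ab else aa) ≤ t ∧ t ≤ (if lb < la then lb else la)) := by
  have hstart : (if aa < ab then ab else aa) ≤ t ↔ aa ≤ t ∧ ab ≤ t := by
    split_ifs with h
    · exact ⟨fun hx => ⟨le_trans (le_of_lt h) hx, hx⟩, fun hx => hx.2⟩
    · exact ⟨fun hx => ⟨hx, le_trans (not_lt.mp h) hx⟩, fun hx => hx.1⟩
  have hstop : t ≤ (if lb < la then lb else la) ↔ t ≤ la ∧ t ≤ lb := by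
    split_ifs with h
    · exact ⟨fun hx => ⟨le_trans hx (le_of_lt h), hx⟩, fun hx => hx.2⟩
    · exact ⟨fun hx => ⟨hx, le_trans hx (not_lt.mp h)⟩, fun hx => hx.1⟩
  simp only [pvCond, decide_eq_decide, hstart, hstop]
  tauto

theorem countDaysTogether_spec : Claim_equal_countDaysTogether := by
  intro A B C D _
  show countDaysTogether A B C D = countDaysTogether_alt A B C D
  have hmonoLe : ∀ (st : List Char) (i j : Nat), i ≤ j → j < pvDates.length →
      decide ((pvDates.getD j []) ≤ st) = true → decide ((pvDates.getD i []) ≤ st) = true := by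
    intro st i j hij hj h
    simp only [decide_eq_true_eq] at h ⊢
    rcases eq_or_lt_of_le hij with rfl | hlt
    · exact h
    · have hi' : i < pvDates.length := lt_trans hlt hj
      have hp := List.pairwise_iff_getElem.mp pvDates_sorted i j hi' hj hlt
      rw [List.getD_eq_getElem _ _ hj] at h
      rw [List.getD_eq_getElem _ _ hi']
      exact le_trans hp h
  have hmonoLt : ∀ (st : List Char) (i j : Nat), i ≤ j → j < pvDates.length →
      decide ((pvDates.getD j []) < st) = true → decide ((pvDates.getD i []) < st) = true := by
    intro st i j hij hj h
    simp only [decide_eq_true_eq] at h ⊢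
    rcases eq_or_lt_of_le hij with rfl | hlt
    · exact h
    · have hi' : i < pvDates.length := lt_trans hlt hj
      have hp := List.pairwise_iff_getElem.mp pvDates_sorted i j hi' hj hlt
      rw [List.getD_eq_getElem _ _ hj] at h
      rw [List.getD_eq_getElem _ _ hi']
      exact lt_of_le_of_lt hp h
  calc countDaysTogether A B C D
      = ((pvDates.countP (fun t => pvCond A.toList B.toList C.toList D.toList t) : Nat) : Int) := by
        simp only [countDaysTogether]
        rw [pvFoldA_eq A.toList B.toList C.toList D.toList _ 0 pvDayStrs_sorted, pvDates_eq,
          zero_add]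
    _ = ((pvDates.countP (fun t => decide ((if A.toList < C.toList then C.toList else A.toList) ≤ t ∧
            t ≤ (if D.toList < B.toList then D.toList else B.toList))) : Nat) : Int) := by
        rw [List.countP_congr (fun t _ => by
          rw [pvCond_congr A.toList B.toList C.toList D.toList t])]
    _ = max 0 ((pvDates.countP (fun t => decide (t ≤ (if D.toList < B.toList then D.toList else B.toList))) : Int)
          - (pvDates.countP (fun t => decide (t < (if A.toList < C.toList then C.toList else A.toList))) : Int)) :=
        pvCount_arith pvDates _ _
    _ = countDaysTogether_alt A B C D := by
        simp only [countDaysTogether_alt]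
        rw [pvBsearch_countP _ (hmonoLe (if D.toList < B.toList then D.toList else B.toList)),
          pvBsearch_countP _ (hmonoLt (if A.toList < C.toList then C.toList else A.toList))]
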